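-- pv_equiv track=rewrite | github.com/jksdf/IV122 | src/week1/Solution.py | a2
-- ===== SOURCE A (Python) =====
-- import math
-- from collections import defaultdict
--
-- def a2(top=1000, k=3):
--     assert k > 0
--     squares = {i * i: {(i,)} for i in range(1, int(math.sqrt(top)) + 1) if i * i < top}
--     prev = squares
--     for count in range(1, k):
--         new = defaultdict(set)
--         for anum, aitems in prev.items():
--             for bnum, bitems in squares.items():
--                 if anum + bnum < top:
--                     for i in aitems:
--                         for j in bitems:
--                             new[anum + bnum].add(tuple(sorted(i + j)))
--         prev = new
--
--     return '{} numbers (smaller than {}) can not be written as a sum of {} squares'.format(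
--         top - 1 - len(prev), top, k)
-- ===== SOURCE B (Python) =====
-- import math
--
--
-- def a2(top=1000, k=3):
--     # Layered reachability: track only the SET of sums expressible as a sum of
--     # `count` positive squares (< top), never the representations themselves.
--     assert k > 0
--     squares = [i * i for i in range(1, math.isqrt(top) + 1) if i * i < top]
--     reach = set(squares)
--     for _ in range(k - 1):
--         reach = {a + b for a in reach for b in squares if a + b < top}
--     return '{} numbers (smaller than {}) can not be written as a sum of {} squares'.format(
--         top - 1 - len(reach), top, k)
-- ===== Notes on version B (the rewrite author's own statement) =====
-- stated objective: faster
-- what changed: A enumerates every sorted tuple of k squares per reachable sum (exponentially many representations); B keeps only the set of sums reachable with the current number of squares and rebuilds it layer by layer.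
import Mathlib
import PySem

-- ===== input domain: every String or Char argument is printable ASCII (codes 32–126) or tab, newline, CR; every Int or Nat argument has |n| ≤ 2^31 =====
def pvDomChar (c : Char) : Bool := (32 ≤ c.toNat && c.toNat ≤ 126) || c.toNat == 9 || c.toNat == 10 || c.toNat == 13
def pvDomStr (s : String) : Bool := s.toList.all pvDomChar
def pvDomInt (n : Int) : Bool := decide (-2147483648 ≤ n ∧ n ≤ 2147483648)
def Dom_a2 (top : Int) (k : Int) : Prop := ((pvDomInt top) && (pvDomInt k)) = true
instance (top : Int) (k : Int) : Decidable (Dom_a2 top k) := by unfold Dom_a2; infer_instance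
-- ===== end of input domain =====

-- B replaces A's exponential enumeration of all square representations by a layered
-- reachable-sum set DP, keeping only the set of expressible sums per layer (alternative/faster).

-- ===== PORT A =====
-- int(math.sqrt(top)) for 0 ≤ top ≤ 2^31: the double sqrt is exact enough that
-- int(math.sqrt(top)) = isqrt(top) = Nat.sqrt top.toNat (nearest integer boundary is
-- ≥ 1/(2·√top) ≈ 2⁻¹⁶ away, far above the 2⁻³⁷ float error); top < 0 raises (outside Pre_).
-- squares = {i*i: {(i,)} for i in range(1, int(math.sqrt(top)) + 1) if i*i < top}
def aSquares (top : Int) : PySem.Dict Int (PySem.Set (List Int)) :=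
  (PySem.List.pyRange 1 ((Nat.sqrt top.toNat : Int) + 1)).foldl
    (fun d i => if i * i < top then d.insert (i * i) (PySem.Set.ofList [[i]]) else d)
    PySem.Dict.empty

-- one iteration of A's 'for count in range(1, k)' loop body (new = defaultdict(set); nested loops)
def aStep (top : Int) (squares prev : PySem.Dict Int (PySem.Set (List Int))) :
    PySem.Dict Int (PySem.Set (List Int)) :=
  prev.items.foldl (fun new a =>
    squares.items.foldl (fun new b =>
      if a.1 + b.1 < top then
        a.2.foldl (fun new i =>
          b.2.foldl (fun new j =>
            new.modify (a.1 + b.1) PySem.Set.empty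
              (fun s => s.add (PySem.List.sorted (i ++ j) (fun x => x) false))) new) new
      else new) new) PySem.Dict.empty

def a2 (top : Int) (k : Int) : String :=
  let squares := aSquares top
  let prev := (PySem.List.pyRange 1 k).foldl (fun prev _ => aStep top squares prev) squares
  PySem.Int.toStr (top - 1 - (prev.size : Int)) ++ " numbers (smaller than "
    ++ PySem.Int.toStr top ++ ") can not be written as a sum of "
    ++ PySem.Int.toStr k ++ " squares"

-- ===== PORT B =====
-- squares = [i*i for i in range(1, math.isqrt(top) + 1) if i*i < top]
def bSquares (top : Int) : List Int :=
  ((PySem.List.pyRange 1 ((Nat.sqrt top.toNat : Int) + 1)).filter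
    (fun i => i * i < top)).map (fun i => i * i)

-- reach = {a + b for a in reach for b in squares if a + b < top}
def bStep (top : Int) (squares : List Int) (reach : PySem.Set Int) : PySem.Set Int :=
  PySem.Set.ofList (reach.flatMap (fun a =>
    (squares.filter (fun b => a + b < top)).map (fun b => a + b)))

def a2_alt (top : Int) (k : Int) : String :=
  let squares := bSquares top
  let reach := (PySem.List.pyRange 0 (k - 1)).foldl
    (fun reach _ => bStep top squares reach) (PySem.Set.ofList squares)
  PySem.Int.toStr (top - 1 - (PySem.Set.len reach)) ++ " numbers (smaller than "
    ++ PySem.Int.toStr top ++ ") can not be written as a sum of "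
    ++ PySem.Int.toStr k ++ " squares"

-- ===== PRECONDITION & SPEC =====
-- Pre_ excludes exactly the inputs where Python A raises: k ≤ 0 (AssertionError from
-- 'assert k > 0') and top < 0 (ValueError from math.sqrt of a negative number).
def Pre_a2 (top : Int) (k : Int) : Prop := 0 ≤ top ∧ 1 ≤ k
instance (top : Int) (k : Int) : Decidable (Pre_a2 top k) := by unfold Pre_a2; infer_instance
def pvWitness_a2 : Int × Int := (20, 2)

def Spec_a2 (top : Int) (k : Int) (out : String) : Prop := out = a2_alt top k
instance (top : Int) (k : Int) (out : String) : Decidable (Spec_a2 top k out) := by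
  unfold Spec_a2; infer_instance

-- ===== CLAIM (what is proved, stated in full; the proofs are below) =====
def Claim_equal_a2 : Prop := ∀ (top : Int) (k : Int), Dom_a2 top k → Pre_a2 top k → Spec_a2 top k (a2 top k)

-- ===== LEMMAS AND PROOFS =====

def GoodD (d : PySem.Dict Int (PySem.Set (List Int))) : Prop :=
  d.keys.Nodup ∧ ∀ x ∈ d.keys, d.getD x PySem.Set.empty ≠ PySem.Set.empty

lemma set_add_ne_empty {α : Type} [BEq α] (s : PySem.Set α) (y : α) :
    s.add y ≠ PySem.Set.empty := by
  cases s with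
  | nil => simp [PySem.Set.add, PySem.Set.contains, PySem.Set.empty]
  | cons h t =>
    simp only [PySem.Set.add, PySem.Set.empty]
    split <;> simp

lemma good_modify (s : Int) (g : PySem.Set (List Int) → PySem.Set (List Int))
    (hg : ∀ t, g t ≠ PySem.Set.empty)
    (new : PySem.Dict Int (PySem.Set (List Int))) (h : GoodD new) :
    GoodD (new.modify s PySem.Set.empty g) ∧
    ∀ x, x ∈ (new.modify s PySem.Set.empty g).keys ↔ x ∈ new.keys ∨ x = s := by
  obtain ⟨hnd, hne⟩ := h
  simp only [PySem.Dict.modify]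
  refine ⟨⟨PySem.Dict.nodup_keys_insert _ _ _ hnd, ?_⟩, ?_⟩
  · intro x hx
    rw [PySem.Dict.getD_insert]
    split
    · exact hg _
    · exact hne x ((PySem.Dict.mem_keys_insert _ _ _ _).1 hx |>.resolve_left (by assumption))
  · intro x
    rw [PySem.Dict.mem_keys_insert]; tauto

lemma level1 (s : Int) (i : List Int) (bitems : List (List Int))
    (new : PySem.Dict Int (PySem.Set (List Int))) (h : GoodD new) :
    GoodD (bitems.foldl (fun new j =>
        new.modify s PySem.Set.empty
          (fun t => t.add (PySem.List.sorted (i ++ j) (fun x => x) false))) new) ∧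
    ∀ x, x ∈ (bitems.foldl (fun new j =>
        new.modify s PySem.Set.empty
          (fun t => t.add (PySem.List.sorted (i ++ j) (fun x => x) false))) new).keys ↔
      x ∈ new.keys ∨ (bitems ≠ [] ∧ x = s) := by
  induction bitems generalizing new with
  | nil => simpa using h
  | cons j t ih =>
    have hm := good_modify s (fun t => t.add (PySem.List.sorted (i ++ j) (fun x => x) false)) (fun t' => set_add_ne_empty t' _) new h
    obtain ⟨h1, h2⟩ := ih _ hm.1
    refine ⟨h1, fun x => ?_⟩
    simp only [List.foldl_cons] at *
    rw [h2, hm.2]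
    simp only [ne_eq, reduceCtorEq, not_false_eq_true, true_and]
    tauto

lemma level2 (s : Int) (aitems bitems : List (List Int))
    (new : PySem.Dict Int (PySem.Set (List Int))) (h : GoodD new) :
    GoodD (aitems.foldl (fun new i =>
        bitems.foldl (fun new j =>
          new.modify s PySem.Set.empty
            (fun t => t.add (PySem.List.sorted (i ++ j) (fun x => x) false))) new) new) ∧
    ∀ x, x ∈ (aitems.foldl (fun new i =>
        bitems.foldl (fun new j =>
          new.modify s PySem.Set.empty
            (fun t => t.add (PySem.List.sorted (i ++ j) (fun x => x) false))) new) new).keys ↔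
      x ∈ new.keys ∨ (aitems ≠ [] ∧ bitems ≠ [] ∧ x = s) := by
  induction aitems generalizing new with
  | nil => simpa using h
  | cons i t ih =>
    have hm := level1 s i bitems new h
    obtain ⟨h1, h2⟩ := ih _ hm.1
    refine ⟨h1, fun x => ?_⟩
    simp only [List.foldl_cons] at *
    rw [h2, hm.2]
    simp only [ne_eq, reduceCtorEq, not_false_eq_true, true_and]
    tauto

lemma level3 (top : Int) (a : Int × PySem.Set (List Int)) (sqItems : List (Int × PySem.Set (List Int)))
    (new : PySem.Dict Int (PySem.Set (List Int))) (h : GoodD new) :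
    GoodD (sqItems.foldl (fun new b =>
        if a.1 + b.1 < top then
          a.2.foldl (fun new i =>
            b.2.foldl (fun new j =>
              new.modify (a.1 + b.1) PySem.Set.empty
                (fun s => s.add (PySem.List.sorted (i ++ j) (fun x => x) false))) new) new
        else new) new) ∧
    ∀ x, x ∈ (sqItems.foldl (fun new b =>
        if a.1 + b.1 < top then
          a.2.foldl (fun new i =>
            b.2.foldl (fun new j =>
              new.modify (a.1 + b.1) PySem.Set.empty
                (fun s => s.add (PySem.List.sorted (i ++ j) (fun x => x) false))) new) new
        else new) new).keys ↔
      x ∈ new.keys ∨ ∃ b ∈ sqItems, a.1 + b.1 < top ∧ a.2 ≠ [] ∧ b.2 ≠ [] ∧ x = a.1 + b.1 := by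
  induction sqItems generalizing new with
  | nil => simpa using h
  | cons b t ih =>
    by_cases hb : a.1 + b.1 < top
    · have hm := level2 (a.1 + b.1) a.2 b.2 new h
      obtain ⟨h1, h2⟩ := ih _ hm.1
      simp only [List.foldl_cons, if_pos hb]
      refine ⟨h1, fun x => ?_⟩
      rw [h2, hm.2]
      simp only [List.mem_cons, ne_eq]
      constructor
      · rintro ((hx | ⟨ha, hbne, rfl⟩) | ⟨c, hc, h3, h4, h5, rfl⟩)
        · exact Or.inl hx
        · exact Or.inr ⟨b, Or.inl rfl, hb, ha, hbne, rfl⟩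
        · exact Or.inr ⟨c, Or.inr hc, h3, h4, h5, rfl⟩
      · rintro (hx | ⟨c, (rfl | hc), h3, h4, h5, rfl⟩)
        · exact Or.inl (Or.inl hx)
        · exact Or.inl (Or.inr ⟨h4, h5, rfl⟩)
        · exact Or.inr ⟨c, hc, h3, h4, h5, rfl⟩
    · obtain ⟨h1, h2⟩ := ih new h
      simp only [List.foldl_cons, if_neg hb]
      refine ⟨h1, fun x => ?_⟩
      rw [h2]
      simp only [List.mem_cons, ne_eq]
      constructor
      · rintro (hx | ⟨c, hc, h3, h4, h5, rfl⟩)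
        · exact Or.inl hx
        · exact Or.inr ⟨c, Or.inr hc, h3, h4, h5, rfl⟩
      · rintro (hx | ⟨c, (rfl | hc), h3, h4, h5, rfl⟩)
        · exact Or.inl hx
        · exact absurd h3 hb
        · exact Or.inr ⟨c, hc, h3, h4, h5, rfl⟩

lemma level4 (top : Int) (pItems sqItems : List (Int × PySem.Set (List Int)))
    (new : PySem.Dict Int (PySem.Set (List Int))) (h : GoodD new) :
    GoodD (pItems.foldl (fun new a =>
        sqItems.foldl (fun new b =>
          if a.1 + b.1 < top then
            a.2.foldl (fun new i =>
              b.2.foldl (fun new j =>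
                new.modify (a.1 + b.1) PySem.Set.empty
                  (fun s => s.add (PySem.List.sorted (i ++ j) (fun x => x) false))) new) new
          else new) new) new) ∧
    ∀ x, x ∈ (pItems.foldl (fun new a =>
        sqItems.foldl (fun new b =>
          if a.1 + b.1 < top then
            a.2.foldl (fun new i =>
              b.2.foldl (fun new j =>
                new.modify (a.1 + b.1) PySem.Set.empty
                  (fun s => s.add (PySem.List.sorted (i ++ j) (fun x => x) false))) new) new
          else new) new) new).keys ↔
      x ∈ new.keys ∨ ∃ a ∈ pItems, ∃ b ∈ sqItems,
        a.1 + b.1 < top ∧ a.2 ≠ [] ∧ b.2 ≠ [] ∧ x = a.1 + b.1 := by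
  induction pItems generalizing new with
  | nil => simpa using h
  | cons a t ih =>
    have hm := level3 top a sqItems new h
    obtain ⟨h1, h2⟩ := ih _ hm.1
    simp only [List.foldl_cons]
    refine ⟨h1, fun x => ?_⟩
    rw [h2, hm.2]
    simp only [List.mem_cons]
    constructor
    · rintro ((hx | ⟨b, hb, h3, h4, h5, rfl⟩) | ⟨c, hc, b, hb, h3, h4, h5, rfl⟩)
      · exact Or.inl hx
      · exact Or.inr ⟨a, Or.inl rfl, b, hb, h3, h4, h5, rfl⟩
      · exact Or.inr ⟨c, Or.inr hc, b, hb, h3, h4, h5, rfl⟩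
    · rintro (hx | ⟨c, (rfl | hc), b, hb, h3, h4, h5, rfl⟩)
      · exact Or.inl (Or.inl hx)
      · exact Or.inl (Or.inr ⟨b, hb, h3, h4, h5, rfl⟩)
      · exact Or.inr ⟨c, hc, b, hb, h3, h4, h5, rfl⟩



lemma good_empty : GoodD PySem.Dict.empty := by
  constructor <;> simp [PySem.Dict.keys_empty]

lemma sqfold (top : Int) (l : List Int) (d : PySem.Dict Int (PySem.Set (List Int))) (h : GoodD d) :
    GoodD (l.foldl (fun d i => if i * i < top then d.insert (i * i) (PySem.Set.ofList [[i]]) else d) d) ∧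
    ∀ x, x ∈ (l.foldl (fun d i => if i * i < top then d.insert (i * i) (PySem.Set.ofList [[i]]) else d) d).keys ↔
      x ∈ d.keys ∨ ∃ i ∈ l, i * i < top ∧ x = i * i := by
  induction l generalizing d with
  | nil => simpa using h
  | cons i t ih =>
    by_cases hi : i * i < top
    · obtain ⟨hnd, hne⟩ := h
      have hgood : GoodD (d.insert (i * i) (PySem.Set.ofList [[i]])) := by
        refine ⟨PySem.Dict.nodup_keys_insert _ _ _ hnd, fun x hx => ?_⟩
        rw [PySem.Dict.getD_insert]
        split
        · simp [PySem.Set.ofList, PySem.Set.add, PySem.Set.empty]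
        · exact hne x ((PySem.Dict.mem_keys_insert _ _ _ _).1 hx |>.resolve_left (by assumption))
      obtain ⟨h1, h2⟩ := ih _ hgood
      simp only [List.foldl_cons, if_pos hi]
      refine ⟨h1, fun x => ?_⟩
      rw [h2, PySem.Dict.mem_keys_insert]
      simp only [List.mem_cons]
      constructor
      · rintro ((rfl | hx) | ⟨c, hc, h3, rfl⟩)
        · exact Or.inr ⟨i, Or.inl rfl, hi, rfl⟩
        · exact Or.inl hx
        · exact Or.inr ⟨c, Or.inr hc, h3, rfl⟩
      · rintro (hx | ⟨c, (rfl | hc), h3, rfl⟩)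
        · exact Or.inl (Or.inr hx)
        · exact Or.inl (Or.inl rfl)
        · exact Or.inr ⟨c, hc, h3, rfl⟩
    · obtain ⟨h1, h2⟩ := ih d h
      simp only [List.foldl_cons, if_neg hi]
      refine ⟨h1, fun x => ?_⟩
      rw [h2]
      simp only [List.mem_cons]
      constructor
      · rintro (hx | ⟨c, hc, h3, rfl⟩)
        · exact Or.inl hx
        · exact Or.inr ⟨c, Or.inr hc, h3, rfl⟩
      · rintro (hx | ⟨c, (rfl | hc), h3, rfl⟩)
        · exact Or.inl hx
        · exact absurd h3 hi
        · exact Or.inr ⟨c, hc, h3, rfl⟩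

lemma aSquares_good (top : Int) : GoodD (aSquares top) :=
  (sqfold top _ _ good_empty).1

lemma aSquares_mem (top : Int) (x : Int) :
    x ∈ (aSquares top).keys ↔ x ∈ bSquares top := by
  unfold aSquares
  rw [(sqfold top _ _ good_empty).2 x]
  simp only [bSquares, PySem.Dict.keys_empty, List.mem_map, List.mem_filter,
    List.not_mem_nil, false_or, decide_eq_true_eq]
  tauto

lemma items_iff (d : PySem.Dict Int (PySem.Set (List Int))) (h : GoodD d)
    (a : Int × PySem.Set (List Int)) :
    a ∈ d.items ↔ a.1 ∈ d.keys ∧ a.2 = d.getD a.1 PySem.Set.empty := by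
  constructor
  · intro ha
    exact ⟨PySem.Dict.mem_keys_of_mem_items d ha,
      (PySem.Dict.getD_of_mem_items _ (by exact ha) h.1 _).symm⟩
  · rintro ⟨hk, hv⟩
    rw [PySem.Dict.items_eq_map_keys d h.1 PySem.Set.empty]
    rw [List.mem_map]
    exact ⟨a.1, hk, by rw [← hv]⟩



lemma bStep_mem (top : Int) (squares : List Int) (reach : PySem.Set Int) (x : Int) :
    x ∈ bStep top squares reach ↔ ∃ a ∈ reach, ∃ b ∈ squares, a + b < top ∧ x = a + b := by
  unfold bStep
  rw [PySem.Set.mem_ofList]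
  simp only [List.mem_flatMap, List.mem_map, List.mem_filter, decide_eq_true_eq]
  tauto

def RelAB (d : PySem.Dict Int (PySem.Set (List Int))) (r : PySem.Set Int) : Prop :=
  GoodD d ∧ r.Nodup ∧ ∀ x, x ∈ d.keys ↔ x ∈ r

lemma rel_base (top : Int) : RelAB (aSquares top) (PySem.Set.ofList (bSquares top)) :=
  ⟨aSquares_good top, PySem.Set.nodup_ofList _,
    fun x => by rw [aSquares_mem, PySem.Set.mem_ofList]⟩

lemma rel_step (top : Int) (d : PySem.Dict Int (PySem.Set (List Int))) (r : PySem.Set Int)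
    (h : RelAB d r) : RelAB (aStep top (aSquares top) d) (bStep top (bSquares top) r) := by
  obtain ⟨hg, hnr, hmem⟩ := h
  have hsq := aSquares_good top
  have hl := level4 top d.items (aSquares top).items PySem.Dict.empty good_empty
  refine ⟨hl.1, PySem.Set.nodup_ofList _, fun x => ?_⟩
  rw [show aStep top (aSquares top) d =
    d.items.foldl _ PySem.Dict.empty from rfl, hl.2 x, bStep_mem]
  simp only [PySem.Dict.keys_empty, List.not_mem_nil, false_or]
  constructor
  · rintro ⟨a, ha, b, hb, h3, h4, h5, rfl⟩
    have ha' := (items_iff d hg a).1 ha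
    have hb' := (items_iff _ hsq b).1 hb
    exact ⟨a.1, (hmem a.1).1 ha'.1, b.1, (aSquares_mem top b.1).1 hb'.1, h3, rfl⟩
  · rintro ⟨p, hp, q, hq, h3, rfl⟩
    have hp' : p ∈ d.keys := (hmem p).2 hp
    have hq' : q ∈ (aSquares top).keys := (aSquares_mem top q).2 hq
    refine ⟨(p, d.getD p PySem.Set.empty), (items_iff d hg _).2 ⟨hp', rfl⟩,
      (q, (aSquares top).getD q PySem.Set.empty), (items_iff _ hsq _).2 ⟨hq', rfl⟩,
      h3, hg.2 p hp', hsq.2 q hq', rfl⟩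

lemma rel_size (d : PySem.Dict Int (PySem.Set (List Int))) (r : PySem.Set Int)
    (h : RelAB d r) : (d.size : Int) = PySem.Set.len r := by
  obtain ⟨⟨hnd, _⟩, hnr, hmem⟩ := h
  have : d.keys.length = r.length := ((List.perm_ext_iff_of_nodup hnd hnr).2 hmem).length_eq
  have hsize : d.size = d.keys.length := by
    simp [PySem.Dict.size, PySem.Dict.keys]
  rw [PySem.Set.len, hsize, this]

lemma foldl_const {α β : Type} (g : α → α) (l : List β) (init : α) :
    l.foldl (fun s _ => g s) init = g^[l.length] init := by
  induction l generalizing init with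
  | nil => simp
  | cons x t ih => simp [ih, Function.iterate_succ_apply]

lemma rel_iterate (top : Int) (n : Nat) :
    RelAB ((aStep top (aSquares top))^[n] (aSquares top))
        ((bStep top (bSquares top))^[n] (PySem.Set.ofList (bSquares top))) := by
  induction n with
  | zero => simpa using rel_base top
  | succ m ih => simpa [Function.iterate_succ_apply'] using rel_step top _ _ ih

-- ===== VERDICT (by name: the statement is the Claim_ definition above) =====
theorem a2_spec : Claim_equal_a2 := by
  intro top k _ _
  unfold Spec_a2
  simp only [a2, a2_alt]
  rw [foldl_const, foldl_const]
  have hlen : (PySem.List.pyRange 1 k).length = (PySem.List.pyRange 0 (k - 1)).length := by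
    simp [PySem.List.length_pyRange_one]
  rw [hlen]
  have h := rel_size _ _ (rel_iterate top (PySem.List.pyRange 0 (k - 1)).length)
  rw [h]
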